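-- pv_equiv track=rewrite | github.com/joey-j-zhu/archivetask | keyword_search.py | remove_delimiters
-- ===== SOURCE A (Python) =====
-- def remove_delimiters(body, left, right):
--     counter = 0
--     new_string = ""
--     for letter in body:
--         if letter == left:
--             counter += 1
--         elif letter == right:
--             counter -= 1
--         elif counter == 0:
--             new_string += letter
--     return new_string
-- ===== SOURCE B (Python) =====
-- from itertools import accumulate
--
-- def remove_delimiters(body, left, right):
--     deltas = [1 if ch == left else (-1 if ch == right else 0) for ch in body]
--     pre = accumulate(deltas, initial=0)
--     return "".join(ch for ch, d, p in zip(body, deltas, pre) if d == 0 and p == 0)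
-- ===== Notes on version B (the rewrite author's own statement) =====
-- stated objective: alternative
-- what changed: Replaces the single stateful counter loop with a two-phase pipeline: first compute a delta list and its running prefix sums (depth before each character), then filter/join characters whose delta is 0 and pre-depth is 0.
import Mathlib
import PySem

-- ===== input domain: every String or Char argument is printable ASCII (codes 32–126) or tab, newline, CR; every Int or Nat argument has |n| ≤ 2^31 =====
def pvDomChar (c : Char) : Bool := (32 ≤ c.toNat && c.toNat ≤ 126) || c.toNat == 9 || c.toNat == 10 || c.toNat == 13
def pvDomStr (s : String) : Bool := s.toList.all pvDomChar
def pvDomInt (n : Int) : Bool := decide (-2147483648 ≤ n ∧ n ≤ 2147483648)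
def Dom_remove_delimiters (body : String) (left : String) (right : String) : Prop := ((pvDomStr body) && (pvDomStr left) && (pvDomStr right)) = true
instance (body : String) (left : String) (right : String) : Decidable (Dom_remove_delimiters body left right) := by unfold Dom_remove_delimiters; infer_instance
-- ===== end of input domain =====

-- B rebuilds the result by a delta/prefix-sum pipeline instead of A's single stateful counter loop (alternative decomposition, same cost).

-- ===== PORT A =====
-- one stateful loop: counter and accumulated string
def remove_delimiters (body : String) (left : String) (right : String) : String :=
  let st := body.toList.foldl
    (fun (st : Int × List Char) letter =>
      if String.mk [letter] = left then (st.1 + 1, st.2)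
      else if String.mk [letter] = right then (st.1 - 1, st.2)
      else if st.1 = 0 then (st.1, st.2 ++ [letter])
      else st)
    (0, [])
  String.mk st.2

-- ===== PORT B =====
-- delta of one character: +1 for left, -1 for right (left tested first), else 0
def rdDelta (left : String) (right : String) (ch : Char) : Int :=
  if String.mk [ch] = left then 1 else if String.mk [ch] = right then -1 else 0

def remove_delimiters_alt (body : String) (left : String) (right : String) : String :=
  let cs := body.toList
  let deltas := cs.map (rdDelta left right)
  let pre := List.scanl (· + ·) 0 deltas
  String.mk ((((cs.zip deltas).zip pre).filter
      (fun p => p.1.2 == 0 && p.2 == 0)).map (fun p => p.1.1))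

-- ===== PRECONDITION & SPEC =====
def Spec_remove_delimiters (body : String) (left : String) (right : String) (out : String) : Prop := out = remove_delimiters_alt body left right
instance (body : String) (left : String) (right : String) (out : String) : Decidable (Spec_remove_delimiters body left right out) := by unfold Spec_remove_delimiters; infer_instance

-- ===== CLAIM (what is proved, stated in full; the proofs are below) =====
def Claim_equal_remove_delimiters : Prop := ∀ (body : String) (left : String) (right : String), Dom_remove_delimiters body left right → Spec_remove_delimiters body left right (remove_delimiters body left right)

-- ===== LEMMAS AND PROOFS =====

-- loop invariant: A's fold from state (k, acc) appends exactly B's filtered zip started at depth k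
lemma rd_core (left right : String) :
    ∀ (cs : List Char) (k : Int) (acc : List Char),
      (cs.foldl
        (fun (st : Int × List Char) letter =>
          if String.mk [letter] = left then (st.1 + 1, st.2)
          else if String.mk [letter] = right then (st.1 - 1, st.2)
          else if st.1 = 0 then (st.1, st.2 ++ [letter])
          else st)
        (k, acc)).2
      = acc ++ ((((cs.zip (cs.map (rdDelta left right))).zip
            (List.scanl (· + ·) k (cs.map (rdDelta left right)))).filter
            (fun p => p.1.2 == 0 && p.2 == 0)).map (fun p => p.1.1)) := by
  intro cs
  induction cs with
  | nil => intro k acc; simp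
  | cons c rest ih =>
    intro k acc
    by_cases hl : String.mk [c] = left
    · simp [List.foldl, hl, rdDelta, ih]
    · by_cases hr : String.mk [c] = right
      · have hrl : ¬ right = left := fun h => hl (hr.trans h)
        have e : k + -1 = k - 1 := by ring
        simp [List.foldl, hr, hrl, rdDelta, ih, e]
      · by_cases hk : k = 0
        · simp [List.foldl, hl, hr, hk, rdDelta, ih]
        · simp [List.foldl, hl, hr, hk, rdDelta, ih]

-- ===== VERDICT (by name: the statement is the Claim_ definition above) =====
theorem remove_delimiters_spec : Claim_equal_remove_delimiters := by
  intro body left right _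
  unfold Spec_remove_delimiters remove_delimiters remove_delimiters_alt
  simp [rd_core left right body.toList 0 []]
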